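-- pv_equiv track=rewrite | github.com/MrBrantCode/unitest_baseline | mut_generate/mist_train_cf/cf_89939/solution.py | character_indices
-- ===== SOURCE A (Python) =====
-- def character_indices(string):
--     char_dict = {}
--     repeated_chars = set()
--
--     # Iterate through the string
--     for index, char in enumerate(string):
--         # Check if character is already in the dictionary
--         if char in char_dict:
--             # Add index to the character's list
--             char_dict[char].append(index)
--             # Add character to the set of repeated characters
--             repeated_chars.add(char)
--         else:
--             # Initialize the character's list with the current index
--             char_dict[char] = [index]
--
--     # Sort the dictionary in descending order by characters
--     sorted_dict = dict(sorted(char_dict.items(), reverse=True))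
--
--     # Filter the dictionary to include only characters that appear more than once
--     filtered_dict = {char: indices for char, indices in sorted_dict.items() if char in repeated_chars}
--
--     return filtered_dict
-- ===== SOURCE B (Python) =====
-- def character_indices(string):
--     result = {}
--     for ch in sorted(set(string), reverse=True):
--         indices = [i for i, c in enumerate(string) if c == ch]
--         if len(indices) > 1:
--             result[ch] = indices
--     return result
-- ===== Notes on version B (the rewrite author's own statement) =====
-- stated objective: simpler
-- what changed: Replaces A's dict-accumulation plus repeated-set plus sort-items-then-filter pipeline with a single loop over the descending-sorted distinct characters that rescans the string once per distinct character and keeps it only when it occurs more than once.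
import Mathlib
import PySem

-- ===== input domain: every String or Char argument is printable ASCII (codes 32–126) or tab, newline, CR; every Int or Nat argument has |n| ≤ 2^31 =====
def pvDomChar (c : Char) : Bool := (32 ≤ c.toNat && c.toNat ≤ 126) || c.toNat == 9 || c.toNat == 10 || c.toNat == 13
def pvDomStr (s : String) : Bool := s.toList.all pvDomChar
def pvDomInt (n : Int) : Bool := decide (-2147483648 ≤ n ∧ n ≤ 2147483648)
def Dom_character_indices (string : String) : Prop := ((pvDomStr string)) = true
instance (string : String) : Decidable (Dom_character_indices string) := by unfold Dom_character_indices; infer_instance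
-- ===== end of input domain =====

-- B replaces A's dict-accumulation + repeated-set + sort-items-then-filter pipeline by one loop over the
-- descending-sorted distinct characters that rescans the string per character (objective: simpler).

-- ===== PORT A =====
def character_indices (string : String) : List (String × List Int) :=
  let step := fun (st : PySem.Dict String (List Int) × PySem.Set String) (p : Int × String) =>
    if st.1.contains p.2 then
      (st.1.modify p.2 [] (fun l => l ++ [p.1]), st.2.add p.2)
    else
      (st.1.insert p.2 [p.1], st.2)
  let st := (PySem.List.enumerate (string.toList.map (fun c => c.toString))).foldl step (PySem.Dict.empty, PySem.Set.empty)
  let sorted_dict := PySem.Dict.ofList (PySem.List.sorted st.1.items (fun p => p.1) true)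
  (PySem.Dict.ofList (sorted_dict.items.filter (fun p => PySem.Set.contains st.2 p.1))).items

-- ===== PORT B =====
def character_indices_alt (string : String) : List (String × List Int) :=
  let chars := string.toList.map (fun c => c.toString)
  ((PySem.List.sorted (PySem.Set.ofList chars) (fun x => x) true).foldl
    (fun (result : PySem.Dict String (List Int)) ch =>
      let indices := ((PySem.List.enumerate chars).filter (fun p => p.2 == ch)).map (fun p => p.1)
      if 1 < indices.length then result.insert ch indices else result)
    PySem.Dict.empty).items

-- ===== PRECONDITION & SPEC =====
def Spec_character_indices (string : String) (out : List (String × List Int)) : Prop := out = character_indices_alt string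
instance (string : String) (out : List (String × List Int)) : Decidable (Spec_character_indices string out) := by unfold Spec_character_indices; infer_instance

-- ===== CLAIM (what is proved, stated in full; the proofs are below) =====
def Claim_equal_character_indices : Prop := ∀ (string : String), Dom_character_indices string → Spec_character_indices string (character_indices string)

-- ===== LEMMAS AND PROOFS =====

-- the dict component of A's loop is the plain group-by-appending fold
theorem pv_foldA_fst (ps : List (Int × String)) (d : PySem.Dict String (List Int)) (r : PySem.Set String) :
    (ps.foldl (fun (st : PySem.Dict String (List Int) × PySem.Set String) p =>
        if st.1.contains p.2 then (st.1.modify p.2 [] (fun l => l ++ [p.1]), st.2.add p.2)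
        else (st.1.insert p.2 [p.1], st.2)) (d, r)).1
    = ps.foldl (fun d p => d.modify p.2 [] (fun l => l ++ [p.1])) d := by
  induction ps generalizing d r with
  | nil => rfl
  | cons p t ih =>
    by_cases h : d.contains p.2 = true
    · simp only [List.foldl_cons, h, if_pos]; exact ih _ _
    · have hm : d.modify p.2 [] (fun l => l ++ [p.1]) = d.insert p.2 [p.1] := by
        simp [PySem.Dict.modify, PySem.Dict.getD_of_not_contains _ _ (by simpa using h)]
      simp only [List.foldl_cons, h, if_neg, Bool.false_eq_true, not_false_iff, hm]
      exact ih _ _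

-- membership in A's "repeated" set after the loop
theorem pv_foldA_snd (ps : List (Int × String)) (d : PySem.Dict String (List Int)) (r : PySem.Set String) (c : String) :
    (c ∈ (ps.foldl (fun (st : PySem.Dict String (List Int) × PySem.Set String) p =>
        if st.1.contains p.2 then (st.1.modify p.2 [] (fun l => l ++ [p.1]), st.2.add p.2)
        else (st.1.insert p.2 [p.1], st.2)) (d, r)).2)
    ↔ (c ∈ r ∨ (d.contains c = true ∧ 1 ≤ ps.countP (fun p => p.2 == c)) ∨ 2 ≤ ps.countP (fun p => p.2 == c)) := by
  induction ps generalizing d r with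
  | nil => simp
  | cons p t ih =>
    by_cases h : d.contains p.2 = true
    · simp only [List.foldl_cons, h, if_pos]
      rw [ih]
      by_cases hpc : p.2 = c
      · subst hpc
        simp only [List.countP_cons, beq_self_eq_true, if_pos]
        generalize List.countP (fun q => q.2 == p.2) t = n
        by_cases hr : p.2 ∈ r <;>
          simp [PySem.Dict.contains_modify, h, hr]
      · have hcp : ¬ c = p.2 := fun e => hpc e.symm
        have hb : (p.2 == c) = false := beq_eq_false_iff_ne.mpr hpc
        simp only [List.countP_cons, hb, Bool.false_eq_true, if_false, add_zero]
        generalize List.countP (fun q => q.2 == c) t = n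
        by_cases hr : c ∈ r <;>
          simp [PySem.Set.mem_add, PySem.Dict.contains_modify, hcp, hr]
    · simp only [List.foldl_cons, h, if_neg, Bool.false_eq_true, not_false_iff]
      rw [ih]
      by_cases hpc : p.2 = c
      · subst hpc
        have h0 : d.contains p.2 = false := by simpa using h
        simp only [List.countP_cons, beq_self_eq_true, if_pos]
        generalize List.countP (fun q => q.2 == p.2) t = n
        by_cases hr : p.2 ∈ r <;>
          simp [h0, hr] <;> omega
      · have hcp : ¬ c = p.2 := fun e => hpc e.symm
        have hb : (p.2 == c) = false := beq_eq_false_iff_ne.mpr hpc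
        simp only [List.countP_cons, hb, Bool.false_eq_true, if_false, add_zero]
        generalize List.countP (fun q => q.2 == c) t = n
        by_cases hr : c ∈ r <;>
          simp [PySem.Dict.contains_insert, hcp, hr]

-- items of a dict built from an association list with distinct keys
theorem pv_items_ofList (l : List (String × List Int)) (h : (l.map Prod.fst).Nodup) :
    (PySem.Dict.ofList l).items = l := by
  have := PySem.Dict.items_foldl_insert_fresh l Prod.fst Prod.snd PySem.Dict.empty
    (fun a _ => PySem.Dict.contains_empty _) h
  simpa [PySem.Dict.ofList, PySem.Dict.update, PySem.Dict.empty] using this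

-- B's conditional-insert loop over distinct fresh keys appends in order
theorem pv_foldB (v : String → List Int) (l : List String) (d : PySem.Dict String (List Int))
    (hf : ∀ ch ∈ l, d.contains ch = false) (hn : l.Nodup) :
    (l.foldl (fun d ch => if 1 < (v ch).length then d.insert ch (v ch) else d) d).items
    = d.items ++ (l.filter (fun ch => decide (1 < (v ch).length))).map (fun ch => (ch, v ch)) := by
  induction l generalizing d with
  | nil => simp
  | cons ch t ih =>
    have hfresh := hf ch (by simp)
    have hn' := hn.of_cons
    have hcht : ch ∉ t := by simpa using (List.nodup_cons.mp hn).1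
    by_cases hc : 1 < (v ch).length
    · have hf' : ∀ x ∈ t, (d.insert ch (v ch)).contains x = false := by
        intro x hx
        rw [PySem.Dict.contains_insert]
        have : (x == ch) = false := by
          simp only [beq_eq_false_iff_ne]; exact fun e => hcht (e ▸ hx)
        simp [this, hf x (by simp [hx])]
      simp only [List.foldl_cons, if_pos hc, List.filter_cons, decide_eq_true hc]
      rw [ih _ hf' hn', PySem.Dict.items_insert_of_not_contains _ _ hfresh]
      simp
    · simp only [List.foldl_cons, if_neg hc, List.filter_cons]
      rw [ih _ (fun x hx => hf x (by simp [hx])) hn']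
      simp [hc]

-- the descending sort of the distinct characters is strictly decreasing
theorem pv_desc_pairwise (xs : List String) :
    (PySem.List.sorted (PySem.Set.ofList xs) (fun x => x) true).Pairwise (fun a b => b < a) := by
  have hle := PySem.List.sorted_pairwise_rev (PySem.Set.ofList xs) (fun x : String => x)
  have hnd : (PySem.List.sorted (PySem.Set.ofList xs) (fun x : String => x) true).Nodup :=
    (PySem.List.sorted_perm _ _ _).nodup_iff.mpr (PySem.Set.nodup_ofList xs)
  exact (hle.and hnd).imp (fun h => lt_of_le_of_ne h.1 (Ne.symm h.2))

-- the whole pipeline, over an arbitrary list of (one-character) strings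
theorem pv_main (chars : List String) :
    (PySem.Dict.ofList
      ((PySem.Dict.ofList (PySem.List.sorted
          ((PySem.List.enumerate chars).foldl
            (fun (st : PySem.Dict String (List Int) × PySem.Set String) p =>
              if st.1.contains p.2 then (st.1.modify p.2 [] (fun l => l ++ [p.1]), st.2.add p.2)
              else (st.1.insert p.2 [p.1], st.2)) (PySem.Dict.empty, PySem.Set.empty)).1.items
          (fun p => p.1) true)).items.filter
        (fun p => PySem.Set.contains
          ((PySem.List.enumerate chars).foldl
            (fun (st : PySem.Dict String (List Int) × PySem.Set String) p =>
              if st.1.contains p.2 then (st.1.modify p.2 [] (fun l => l ++ [p.1]), st.2.add p.2)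
              else (st.1.insert p.2 [p.1], st.2)) (PySem.Dict.empty, PySem.Set.empty)).2 p.1))).items
    = ((PySem.List.sorted (PySem.Set.ofList chars) (fun x => x) true).foldl
        (fun (result : PySem.Dict String (List Int)) ch =>
          if 1 < (((PySem.List.enumerate chars).filter (fun p => p.2 == ch)).map (fun p => p.1)).length
          then result.insert ch (((PySem.List.enumerate chars).filter (fun p => p.2 == ch)).map (fun p => p.1))
          else result)
        PySem.Dict.empty).items := by
  set ps := PySem.List.enumerate chars with hps
  set st := ps.foldl
      (fun (st : PySem.Dict String (List Int) × PySem.Set String) p =>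
        if st.1.contains p.2 then (st.1.modify p.2 [] (fun l => l ++ [p.1]), st.2.add p.2)
        else (st.1.insert p.2 [p.1], st.2)) (PySem.Dict.empty, PySem.Set.empty) with hst
  have hst1 : st.1 = ps.foldl (fun d p => d.modify p.2 [] (fun l => l ++ [p.1])) PySem.Dict.empty := by
    rw [hst]; exact pv_foldA_fst ps _ _
  have hkeys : st.1.keys = PySem.Set.ofList chars := by
    rw [hst1, PySem.Dict.keys_foldl_modify_key ps (fun p => p.2) [] (fun _ p => fun l => l ++ [p.1]) PySem.Dict.empty]
    simp [hps, PySem.Dict.keys_empty, PySem.Set.update_nil_left, PySem.List.map_snd_enumerate]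
  have hnodupk : st.1.keys.Nodup := by rw [hkeys]; exact PySem.Set.nodup_ofList _
  have hgetD : ∀ c, st.1.getD c [] = (ps.filter (fun p => p.2 == c)).map (fun p => p.1) := by
    intro c
    have hfold : ps.foldl (fun d p => d.modify p.2 [] (fun l => l ++ [p.1])) PySem.Dict.empty
        = (ps.map Prod.swap).foldl (fun d q => d.modify q.1 [] (fun l => l ++ [q.2])) PySem.Dict.empty := by
      rw [List.foldl_map]; simp
    rw [hst1, hfold, PySem.Dict.getD_foldl_modify_append]
    simp [PySem.Dict.getD_empty, List.filter_map, Function.comp_def, List.map_map]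
  have hitems : st.1.items = (PySem.Set.ofList chars).map
      (fun k => (k, (ps.filter (fun p => p.2 == k)).map (fun p => p.1))) := by
    rw [PySem.Dict.items_eq_map_keys st.1 hnodupk [], hkeys]
    exact List.map_congr_left (fun k _ => by rw [hgetD])
  have hdesc_nodup : (PySem.List.sorted (PySem.Set.ofList chars) (fun x : String => x) true).Nodup :=
    (PySem.List.sorted_perm _ _ _).nodup_iff.mpr (PySem.Set.nodup_ofList chars)
  have hsorted : PySem.List.sorted st.1.items (fun p => p.1) true
      = (PySem.List.sorted (PySem.Set.ofList chars) (fun x => x) true).map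
          (fun k => (k, (ps.filter (fun p => p.2 == k)).map (fun p => p.1))) := by
    apply PySem.List.sorted_rev_eq_of_perm_of_pairwise_gt
    · rw [hitems]; exact (PySem.List.sorted_perm _ _ _).map _
    · exact (List.pairwise_map).mpr (by simpa using pv_desc_pairwise chars)
  have hfst1 : (((PySem.List.sorted (PySem.Set.ofList chars) (fun x : String => x) true).map
      (fun k => (k, (ps.filter (fun p => p.2 == k)).map (fun p => p.1)))).map Prod.fst).Nodup := by
    simpa [List.map_map, Function.comp_def] using hdesc_nodup
  have hcontains : ∀ k, PySem.Set.contains st.2 k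
      = decide (1 < ((ps.filter (fun p => p.2 == k)).map (fun p => p.1)).length) := by
    intro k
    have hmem : k ∈ st.2 ↔ 2 ≤ List.countP (fun p => p.2 == k) ps := by
      rw [hst, pv_foldA_snd]
      simp [PySem.Dict.contains_empty, PySem.Set.empty]
    have hlen : ((ps.filter (fun p => p.2 == k)).map (fun p => p.1)).length
        = List.countP (fun p => p.2 == k) ps := by
      simp [List.countP_eq_length_filter]
    rw [Bool.eq_iff_iff, PySem.Set.contains_iff, decide_eq_true_eq, hmem, hlen]
    omega
  rw [hsorted, pv_items_ofList _ hfst1, List.filter_map]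
  have hfc : (PySem.List.sorted (PySem.Set.ofList chars) (fun x : String => x) true).filter
        ((fun p => PySem.Set.contains st.2 p.1) ∘ (fun k => (k, (ps.filter (fun p => p.2 == k)).map (fun p => p.1))))
      = (PySem.List.sorted (PySem.Set.ofList chars) (fun x : String => x) true).filter
        (fun k => decide (1 < ((ps.filter (fun p => p.2 == k)).map (fun p => p.1)).length)) :=
    List.filter_congr (fun k _ => hcontains k)
  rw [hfc]
  have hfst2 : ((((PySem.List.sorted (PySem.Set.ofList chars) (fun x : String => x) true).filter
        (fun k => decide (1 < ((ps.filter (fun p => p.2 == k)).map (fun p => p.1)).length))).map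
        (fun k => (k, (ps.filter (fun p => p.2 == k)).map (fun p => p.1)))).map Prod.fst).Nodup := by
    simpa [List.map_map, Function.comp_def] using hdesc_nodup.filter _
  rw [pv_items_ofList _ hfst2]
  rw [pv_foldB (fun k => (ps.filter (fun p => p.2 == k)).map (fun p => p.1)) _ _
      (fun ch _ => PySem.Dict.contains_empty ch) hdesc_nodup]
  simp [PySem.Dict.empty]

-- ===== VERDICT (by name: the statement is the Claim_ definition above) =====
theorem character_indices_spec : Claim_equal_character_indices := by
  intro s _
  show character_indices s = character_indices_alt s
  exact pv_main (s.toList.map (fun c => c.toString))
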